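-- pv_equiv track=rewrite | github.com/EDA-Teaching-RJH/assignment-foundations-of-programming-ertugrulferit | fleet_manager.py | calculate_payroll
-- ===== SOURCE A (Python) =====
-- def calculate_payroll(ranks):
--     total = 0
--     for rank in ranks:
--         if rank == "Captain": total += 1000
--         elif rank == "Commander": total += 800
--         elif rank == "Lt. Commander": total += 600
--         else: total += 400
--     return total
-- ===== SOURCE B (Python) =====
-- from collections import Counter
--
-- def calculate_payroll(ranks):
--     c = Counter(ranks)
--     named = c["Captain"] + c["Commander"] + c["Lt. Commander"]
--     return (1000 * c["Captain"] + 800 * c["Commander"]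
--             + 600 * c["Lt. Commander"] + 400 * (len(ranks) - named))
-- ===== Notes on version B (the rewrite author's own statement) =====
-- stated objective: alternative
-- what changed: Replaces the per-element if/elif accumulation with a one-pass Counter tally followed by a closed-form weighted sum, deriving the 400-tier headcount as len(ranks) minus the named counts.
import Mathlib
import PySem

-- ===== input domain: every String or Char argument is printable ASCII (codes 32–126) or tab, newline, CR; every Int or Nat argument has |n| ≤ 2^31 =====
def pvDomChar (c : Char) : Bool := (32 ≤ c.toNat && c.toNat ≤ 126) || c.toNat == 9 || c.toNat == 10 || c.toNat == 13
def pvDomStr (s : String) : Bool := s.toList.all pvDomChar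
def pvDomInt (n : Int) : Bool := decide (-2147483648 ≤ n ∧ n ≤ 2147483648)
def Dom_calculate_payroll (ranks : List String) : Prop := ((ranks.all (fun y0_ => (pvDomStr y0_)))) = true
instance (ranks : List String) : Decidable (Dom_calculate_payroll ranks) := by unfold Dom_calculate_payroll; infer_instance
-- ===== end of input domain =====

-- B replaces A's per-element if/elif accumulation by a tally (counts) plus a closed-form weighted sum; alternative decomposition, same cost.


-- ===== PORT A =====
-- literal transliteration: accumulate total over the list with the if/elif chain
def calculate_payroll (ranks : List String) : Int :=
  ranks.foldl (fun total rank =>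
    if rank = "Captain" then total + 1000
    else if rank = "Commander" then total + 800
    else if rank = "Lt. Commander" then total + 600
    else total + 400) 0

-- ===== PORT B =====
-- literal transliteration of Source B: Counter lookups become List.count; remainder pays 400
def calculate_payroll_alt (ranks : List String) : Int :=
  let c1 : Int := ranks.count "Captain"
  let c2 : Int := ranks.count "Commander"
  let c3 : Int := ranks.count "Lt. Commander"
  let named := c1 + c2 + c3
  1000 * c1 + 800 * c2 + 600 * c3 + 400 * ((ranks.length : Int) - named)

-- ===== PRECONDITION & SPEC =====
def Spec_calculate_payroll (ranks : List String) (out : Int) : Prop := out = calculate_payroll_alt ranks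
instance (ranks : List String) (out : Int) : Decidable (Spec_calculate_payroll ranks out) := by unfold Spec_calculate_payroll; infer_instance

-- ===== CLAIM (what is proved, stated in full; the proofs are below) =====
def Claim_equal_calculate_payroll : Prop := ∀ (ranks : List String), Dom_calculate_payroll ranks → Spec_calculate_payroll ranks (calculate_payroll ranks)

-- ===== LEMMAS AND PROOFS =====
theorem calculate_payroll_foldl_shift (ranks : List String) (t : Int) :
    ranks.foldl (fun total rank =>
      if rank = "Captain" then total + 1000
      else if rank = "Commander" then total + 800
      else if rank = "Lt. Commander" then total + 600
      else total + 400) t = t + calculate_payroll_alt ranks := by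
  induction ranks generalizing t with
  | nil => simp [calculate_payroll_alt]
  | cons h tl ih =>
    simp only [List.foldl_cons, ih]
    simp only [calculate_payroll_alt, List.count_cons, List.length_cons]
    split_ifs with h1 h2 h3 <;> simp_all <;> ring

-- ===== VERDICT (by name: the statement is the Claim_ definition above) =====
theorem calculate_payroll_spec : Claim_equal_calculate_payroll := by
  intro ranks _
  unfold Spec_calculate_payroll calculate_payroll
  rw [calculate_payroll_foldl_shift]
  ring
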